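-- pv_equiv track=rewrite | github.com/AliAlizadeh11/quera_problems | p209.py | calculate
-- ===== SOURCE A (Python) =====
-- import math
--
-- def calculate(divisors : list) -> int :
--     result = list()
--     result_mul = math.prod(divisors)
--     count = 1
--     while True:
--         number = count * result_mul
--         if number > 1000:
--             break
--
--         elif number <= 1000:
--             result.append(number)
--             count += 1
--
--     return len(result)
-- ===== SOURCE B (Python) =====
-- def calculate(divisors: list) -> int:
--     p = 1
--     for d in divisors:
--         p *= d
--     return 1000 // p
-- ===== Notes on version B (the rewrite author's own statement) =====
-- stated objective: simpler
-- what changed: Replaces the counting loop over successive multiples with the closed form 1000 // product(divisors).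
import Mathlib
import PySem

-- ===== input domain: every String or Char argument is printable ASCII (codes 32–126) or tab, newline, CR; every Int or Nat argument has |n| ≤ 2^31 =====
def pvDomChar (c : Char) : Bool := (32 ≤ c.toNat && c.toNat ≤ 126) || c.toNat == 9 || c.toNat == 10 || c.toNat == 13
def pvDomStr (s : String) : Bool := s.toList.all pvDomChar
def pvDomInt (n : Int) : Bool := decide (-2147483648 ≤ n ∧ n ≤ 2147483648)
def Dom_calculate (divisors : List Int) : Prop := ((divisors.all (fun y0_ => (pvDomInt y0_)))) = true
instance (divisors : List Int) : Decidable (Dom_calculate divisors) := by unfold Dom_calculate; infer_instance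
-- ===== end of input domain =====

-- B replaces A's multiple-counting loop with the closed form 1000 // prod(divisors).

-- ===== PORT A =====
-- A's 'while True' loop; it runs at most 1001 iterations when the product is
-- positive (the only case Pre_ admits — A diverges otherwise), so fuel 1001 suffices there.
def calcLoopA (fuel : Nat) (result_mul : Int) (count : Int) (result : List Int) : List Int :=
  match fuel with
  | 0 => result
  | f + 1 =>
    let number := count * result_mul
    if number > 1000 then result
    else calcLoopA f result_mul (count + 1) (result ++ [number])

def calculate (divisors : List Int) : Int :=
  let result_mul := divisors.foldl (· * ·) 1    -- math.prod
  ((calcLoopA 1001 result_mul 1 []).length : Int)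

-- ===== PORT B =====
def calculate_alt (divisors : List Int) : Int :=
  let p := divisors.foldl (· * ·) 1
  PySem.Int.floordiv 1000 p

-- ===== PRECONDITION & SPEC =====
-- Pre_ excludes inputs whose product is ≤ 0: there A's loop never reaches number > 1000 and diverges.
def Pre_calculate (divisors : List Int) : Prop := 0 < divisors.foldl (· * ·) 1
instance (divisors : List Int) : Decidable (Pre_calculate divisors) := by unfold Pre_calculate; infer_instance
def pvWitness_calculate : List Int := [2, 3]

def Spec_calculate (divisors : List Int) (out : Int) : Prop := out = calculate_alt divisors
instance (divisors : List Int) (out : Int) : Decidable (Spec_calculate divisors out) := by unfold Spec_calculate; infer_instance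

-- ===== CLAIM (what is proved, stated in full; the proofs are below) =====
def Claim_equal_calculate : Prop := ∀ (divisors : List Int), Dom_calculate divisors → Pre_calculate divisors → Spec_calculate divisors (calculate divisors)

-- ===== LEMMAS AND PROOFS =====

theorem calcLoopA_len (p : Int) (hp : 0 < p) :
    ∀ (fuel : Nat) (c : Int) (res : List Int),
      c ≤ PySem.Int.floordiv 1000 p + 1 →
      (PySem.Int.floordiv 1000 p + 1 - c) + 1 ≤ (fuel : Int) →
      ((calcLoopA fuel p c res).length : Int)
        = (res.length : Int) + (PySem.Int.floordiv 1000 p + 1 - c) := by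
  intro fuel
  induction fuel with
  | zero =>
    intro c res hc hfuel
    exfalso; simp at hfuel; omega
  | succ f ih =>
    intro c res hc hfuel
    have hq : PySem.Int.floordiv 1000 p * p ≤ 1000 ∧ 1000 < (PySem.Int.floordiv 1000 p + 1) * p :=
      (PySem.Int.floordiv_eq_iff_of_pos hp).mp rfl
    set q := PySem.Int.floordiv 1000 p with hqdef
    by_cases h : c * p > 1000
    · -- c > q, hence c = q + 1, loop stops
      have hcq : q < c := by nlinarith
      have : c = q + 1 := by omega
      simp [calcLoopA, h]
      omega
    · -- c * p ≤ 1000, so c ≤ q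
      push Not at h
      have hcq : c ≤ q := by nlinarith
      have := ih (c + 1) (res ++ [c * p]) (by omega) (by push_cast at hfuel ⊢; omega)
      simp [calcLoopA, not_lt.mpr h]
      rw [this]
      simp
      omega

-- ===== VERDICT (by name: the statement is the Claim_ definition above) =====
theorem calculate_spec : Claim_equal_calculate := by
  intro divisors _ hpre
  unfold Spec_calculate calculate calculate_alt
  set p := divisors.foldl (· * ·) 1 with hp
  have hp0 : 0 < p := hpre
  have hq : PySem.Int.floordiv 1000 p * p ≤ 1000 ∧ 1000 < (PySem.Int.floordiv 1000 p + 1) * p :=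
    (PySem.Int.floordiv_eq_iff_of_pos hp0).mp rfl
  have hqnn : 0 ≤ PySem.Int.floordiv 1000 p := by nlinarith
  have hqle : PySem.Int.floordiv 1000 p ≤ 1000 := by nlinarith
  have := calcLoopA_len p hp0 1001 1 [] (by omega) (by push_cast; omega)
  simp at this
  omega
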